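-- pv_equiv track=rewrite | github.com/anatolykobzisty/algorithms | 10-Dynamic_programming/binary_search_array.py | left_board
-- ===== SOURCE A (Python) =====
-- def left_board(A, key):
--     left = -1
--     right = len(A)
--     while right - left > 1:
--         middle = (left + right)//2
--         if A[middle] < key:
--             left = middle
--         else:
--             right = middle
--     return left
-- ===== SOURCE B (Python) =====
-- def left_board(A, key):
--     def go(lo, hi):
--         if hi - lo <= 1:
--             return lo
--         mid = (lo + hi) // 2
--         if A[mid] < key:
--             return go(mid, hi)
--         return go(lo, mid)
--     return go(-1, len(A))
-- ===== Notes on version B (the rewrite author's own statement) =====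
-- stated objective: alternative
-- what changed: The iterative while-loop binary search is reformulated as a recursive divide-and-conquer helper go(lo, hi) maintaining the invariant A[lo] < key <= A[hi], called with the sentinels (-1, len(A)).
import Mathlib
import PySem

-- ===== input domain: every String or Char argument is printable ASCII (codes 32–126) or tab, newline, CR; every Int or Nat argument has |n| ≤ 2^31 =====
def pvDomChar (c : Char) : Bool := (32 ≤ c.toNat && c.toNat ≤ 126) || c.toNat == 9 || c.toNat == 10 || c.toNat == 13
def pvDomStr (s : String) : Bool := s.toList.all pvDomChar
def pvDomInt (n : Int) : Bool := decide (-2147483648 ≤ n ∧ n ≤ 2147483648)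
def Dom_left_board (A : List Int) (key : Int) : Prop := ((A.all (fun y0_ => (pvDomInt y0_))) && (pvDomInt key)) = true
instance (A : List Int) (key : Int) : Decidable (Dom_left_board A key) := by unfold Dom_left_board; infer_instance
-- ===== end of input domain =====

-- B replaces A's iterative while-loop by a recursive divide-and-conquer helper with the same
-- midpoint and comparison (objective: alternative decomposition, same cost).

-- ===== PORT A =====
-- A's while loop as fuel recursion over the loop state (left, right); the fuel A.length + 1
-- bounds the iteration count (the gap right - left shrinks each turn) and only makes it total.
def left_board_loop (A : List Int) (key : Int) (left right : Int) : Nat → Int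
  | 0 => left
  | fuel + 1 =>
    if right - left > 1 then
      let middle := PySem.Int.floordiv (left + right) 2
      if (PySem.List.pyGet? A middle).getD 0 < key then
        left_board_loop A key middle right fuel
      else
        left_board_loop A key left middle fuel
    else left

def left_board (A : List Int) (key : Int) : Int :=
  left_board_loop A key (-1) (A.length : Int) (A.length + 1)

-- ===== PORT B =====
-- midpoint strictly shrinks the gap: used by the recursion's termination proof
theorem pv_mid_bounds (lo hi : Int) (h : 1 < hi - lo) :
    lo < PySem.Int.floordiv (lo + hi) 2 ∧ PySem.Int.floordiv (lo + hi) 2 < hi := by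
  rw [PySem.Int.floordiv_eq_ediv_of_pos (by omega : (0:Int) < 2)]
  omega

def left_board_alt_go (A : List Int) (key : Int) (lo hi : Int) : Int :=
  if _h : hi - lo ≤ 1 then lo
  else
    let mid := PySem.Int.floordiv (lo + hi) 2
    if (PySem.List.pyGet? A mid).getD 0 < key then
      left_board_alt_go A key mid hi
    else
      left_board_alt_go A key lo mid
termination_by (hi - lo).toNat
decreasing_by
  · have := pv_mid_bounds lo hi (by omega); omega
  · have := pv_mid_bounds lo hi (by omega); omega

def left_board_alt (A : List Int) (key : Int) : Int :=
  left_board_alt_go A key (-1) (A.length : Int)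

-- ===== PRECONDITION & SPEC =====
def Spec_left_board (A : List Int) (key : Int) (out : Int) : Prop := out = left_board_alt A key
instance (A : List Int) (key : Int) (out : Int) : Decidable (Spec_left_board A key out) := by unfold Spec_left_board; infer_instance

-- ===== CLAIM (what is proved, stated in full; the proofs are below) =====
def Claim_equal_left_board : Prop := ∀ (A : List Int) (key : Int), Dom_left_board A key → Spec_left_board A key (left_board A key)

-- ===== LEMMAS AND PROOFS =====
theorem left_board_loop_eq_go (A : List Int) (key : Int) :
    ∀ (fuel : Nat) (lo hi : Int), hi - lo ≤ (fuel : Int) →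
      left_board_loop A key lo hi fuel = left_board_alt_go A key lo hi := by
  intro fuel
  induction fuel with
  | zero =>
    intro lo hi h
    rw [left_board_alt_go]
    simp only [left_board_loop]
    rw [dif_pos (by exact_mod_cast (by omega : hi - lo ≤ 1))]
  | succ n ih =>
    intro lo hi h
    rw [left_board_alt_go]
    simp only [left_board_loop]
    by_cases hgap : hi - lo > 1
    · have hmid := pv_mid_bounds lo hi (by omega)
      rw [if_pos hgap, dif_neg (by omega)]
      by_cases hcmp : (PySem.List.pyGet? A (PySem.Int.floordiv (lo + hi) 2)).getD 0 < key
      · simp only [if_pos hcmp]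
        exact ih _ _ (by omega)
      · simp only [if_neg hcmp]
        exact ih _ _ (by omega)
    · rw [if_neg hgap, dif_pos (by omega)]

-- ===== VERDICT (by name: the statement is the Claim_ definition above) =====
theorem left_board_spec : Claim_equal_left_board := by
  intro A key _
  show left_board A key = left_board_alt A key
  unfold left_board left_board_alt
  exact left_board_loop_eq_go A key (A.length + 1) (-1) (A.length : Int) (by omega)
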